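-- pv_equiv track=rewrite | github.com/klieth/advent-of-code | 2021/d5/python/main.py | max_x_y
-- ===== SOURCE A (Python) =====
-- def max_x_y(lines):
--     def iter_coords(l, coord):
--         for a, b in l:
--             yield a[coord]
--             yield b[coord]
--
--     x = max(iter_coords(lines, 0))
--     y = max(iter_coords(lines, 1))
--
--     return (x, y)
-- ===== SOURCE B (Python) =====
-- def max_x_y(lines):
--     it = iter(lines)
--     try:
--         a, b = next(it)
--     except StopIteration:
--         raise ValueError("max() arg is an empty sequence")
--     mx = a[0] if a[0] > b[0] else b[0]
--     my = a[1] if a[1] > b[1] else b[1]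
--     for a, b in it:
--         if a[0] > mx: mx = a[0]
--         if b[0] > mx: mx = b[0]
--         if a[1] > my: my = a[1]
--         if b[1] > my: my = b[1]
--     return (mx, my)
-- ===== Notes on version B (the rewrite author's own statement) =====
-- stated objective: alternative
-- what changed: Replaces two independent generator-fed max() passes over the segments with a single explicit traversal maintaining two running maxima (mx, my), seeded from the first segment.
import Mathlib
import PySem

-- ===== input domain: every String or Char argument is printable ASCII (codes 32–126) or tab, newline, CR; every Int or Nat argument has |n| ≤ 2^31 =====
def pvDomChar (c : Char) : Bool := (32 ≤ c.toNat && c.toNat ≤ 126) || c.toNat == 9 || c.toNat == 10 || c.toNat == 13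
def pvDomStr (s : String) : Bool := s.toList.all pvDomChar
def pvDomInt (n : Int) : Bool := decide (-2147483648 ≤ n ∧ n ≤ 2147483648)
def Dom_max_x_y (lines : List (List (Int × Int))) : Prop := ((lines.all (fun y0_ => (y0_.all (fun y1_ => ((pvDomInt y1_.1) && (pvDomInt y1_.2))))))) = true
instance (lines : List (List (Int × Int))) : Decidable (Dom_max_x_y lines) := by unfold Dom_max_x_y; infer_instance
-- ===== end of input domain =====

-- B replaces A's two independent max() passes by one explicit loop with two running maxima;
-- equivalence proved on nonempty input whose lines each hold exactly two points (elsewhere both raise).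

-- ===== PORT A =====
-- iter_coords(lines, 0): for each line, unpack a, b and yield a[0], b[0] (length-≠-2 lines raise in Python;
-- the `_ => []` arm is unreachable under Pre_).
def pvIterX (lines : List (List (Int × Int))) : List Int :=
  lines.flatMap (fun l => match l with | [a, b] => [a.1, b.1] | _ => [])

def pvIterY (lines : List (List (Int × Int))) : List Int :=
  lines.flatMap (fun l => match l with | [a, b] => [a.2, b.2] | _ => [])

def max_x_y (lines : List (List (Int × Int))) : Int × Int :=
  let x := (PySem.List.max? (pvIterX lines) (fun v => v)).getD 0  -- none = ValueError, outside Pre_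
  let y := (PySem.List.max? (pvIterY lines) (fun v => v)).getD 0
  (x, y)

-- ===== PORT B =====
-- the `for a, b in it` loop of Source B, with its four running-maximum updates
def pvLoopB (mx my : Int) : List (List (Int × Int)) → Int × Int
  | [] => (mx, my)
  | l :: rest =>
    match l with
    | [a, b] =>
      let mx := if a.1 > mx then a.1 else mx
      let mx := if b.1 > mx then b.1 else mx
      let my := if a.2 > my then a.2 else my
      let my := if b.2 > my then b.2 else my
      pvLoopB mx my rest
    | _ => (mx, my)  -- Python raises (unpack error), outside Pre_

def max_x_y_alt (lines : List (List (Int × Int))) : Int × Int :=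
  match lines with
  | [] => (0, 0)  -- Python B raises ValueError here, outside Pre_
  | l :: rest =>
    match l with
    | [a, b] =>
      let mx := if a.1 > b.1 then a.1 else b.1
      let my := if a.2 > b.2 then a.2 else b.2
      pvLoopB mx my rest
    | _ => (0, 0)  -- unpack error, outside Pre_

-- ===== PRECONDITION & SPEC =====
-- Pre_ excludes exactly the inputs where the Python A raises: the empty list (max() on an empty
-- sequence) and any line not holding exactly two points (unpacking `a, b` raises ValueError).
def Pre_max_x_y (lines : List (List (Int × Int))) : Prop :=
  lines ≠ [] ∧ ∀ l ∈ lines, l.length = 2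
instance (lines : List (List (Int × Int))) : Decidable (Pre_max_x_y lines) := by
  unfold Pre_max_x_y; infer_instance

def pvWitness_max_x_y : (List (List (Int × Int))) := [[(1, 2), (3, 4)], [(9, 0), (2, 7)]]

def Spec_max_x_y (lines : List (List (Int × Int))) (out : Int × Int) : Prop := out = max_x_y_alt lines
instance (lines : List (List (Int × Int))) (out : Int × Int) : Decidable (Spec_max_x_y lines out) := by unfold Spec_max_x_y; infer_instance

-- ===== CLAIM (what is proved, stated in full; the proofs are below) =====
def Claim_equal_max_x_y : Prop := ∀ (lines : List (List (Int × Int))), Dom_max_x_y lines → Pre_max_x_y lines → Spec_max_x_y lines (max_x_y lines)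

-- ===== LEMMAS AND PROOFS =====

theorem if_gt_eq_max (m a : Int) : (if a > m then a else m) = max m a := by
  by_cases h : a > m <;> simp [h, max_def] <;> omega

theorem pvLoopB_eq_foldl (rest : List (List (Int × Int))) :
    ∀ mx my, (∀ l ∈ rest, l.length = 2) →
      pvLoopB mx my rest = ((pvIterX rest).foldl max mx, (pvIterY rest).foldl max my) := by
  induction rest with
  | nil => intro mx my _; simp [pvLoopB, pvIterX, pvIterY]
  | cons l rest ih =>
    intro mx my h
    have hl : l.length = 2 := h l (by simp)
    match l, hl with
    | [a, b], _ =>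
      have hrest : ∀ l ∈ rest, l.length = 2 := fun l hm => h l (by simp [hm])
      simp only [pvLoopB, pvIterX, pvIterY, List.flatMap_cons, List.cons_append,
        List.nil_append, if_gt_eq_max, ih _ _ hrest, List.foldl_cons]

-- ===== VERDICT (by name: the statement is the Claim_ definition above) =====
theorem max_x_y_spec : Claim_equal_max_x_y := by
  intro lines _ hpre
  obtain ⟨hne, hlen⟩ := hpre
  match lines with
  | [] => exact absurd rfl hne
  | l :: rest =>
    have hl : l.length = 2 := hlen l (by simp)
    match l, hl with
    | [a, b], _ =>
      have hrest : ∀ l ∈ rest, l.length = 2 := fun l hm => hlen l (by simp [hm])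
      show max_x_y _ = max_x_y_alt _
      simp only [max_x_y, max_x_y_alt, pvIterX, pvIterY, List.flatMap_cons,
        List.cons_append, List.nil_append, PySem.List.max?_id_cons,
        pvLoopB_eq_foldl rest _ _ hrest, if_gt_eq_max]
      simp only [Option.getD_some, List.foldl_cons, max_comm b.1 a.1, max_comm b.2 a.2]
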